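-- pv_equiv track=rewrite | github.com/k-harada/AtCoder | ABC/ABC210/D.py | solve
-- ===== SOURCE A (Python) =====
-- def solve(h, w, c, a):
--
--     dp_left_up = [[0] * w for _ in range(h)]
--     for i in range(h):
--         for j in range(w):
--             dp_left_up[i][j] = a[i][j]
--             if i > 0:
--                 dp_left_up[i][j] = min(dp_left_up[i][j], dp_left_up[i - 1][j] + c)
--             if j > 0:
--                 dp_left_up[i][j] = min(dp_left_up[i][j], dp_left_up[i][j - 1] + c)
--
--     dp_left_down = [[0] * w for _ in range(h)]
--     for i in range(h - 1, -1, -1):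
--         for j in range(w):
--             dp_left_down[i][j] = a[i][j]
--             if i < h - 1:
--                 dp_left_down[i][j] = min(dp_left_down[i][j], dp_left_down[i + 1][j] + c)
--             if j > 0:
--                 dp_left_down[i][j] = min(dp_left_down[i][j], dp_left_down[i][j - 1] + c)
--
--     res = (h + w - 2) * c + a[0][0] + a[-1][-1]
--
--     for i in range(h):
--         for j in range(w):
--             if i > 0:
--                 res = min(a[i][j] + dp_left_up[i - 1][j] + c, res)
--             if i < h - 1:
--                 res = min(a[i][j] + dp_left_down[i + 1][j] + c, res)
--             if j > 0:
--                 res = min(a[i][j] + min(dp_left_up[i][j - 1], dp_left_down[i][j - 1]) + c, res)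
--     return res
-- ===== SOURCE B (Python) =====
-- def solve(h, w, c, a):
--     res = (h + w - 2) * c + a[0][0] + a[-1][-1]
--     cells = [(i, j) for i in range(h) for j in range(w)]
--     for i1, j1 in cells:
--         for i2, j2 in cells:
--             if (i1, j1) != (i2, j2):
--                 res = min(res, a[i1][j1] + a[i2][j2] + c * (abs(i1 - i2) + abs(j1 - j2)))
--     return res
-- ===== Notes on version B (the rewrite author's own statement) =====
-- stated objective: simpler
-- what changed: replaces A's two directional DP tables and three-branch scan by a direct brute-force minimisation of a[p]+a[q]+c*manhattan(p,q) over all ordered pairs of distinct cells, keeping A's initial candidate (h+w-2)*c+a[0][0]+a[-1][-1]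
import Mathlib
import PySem

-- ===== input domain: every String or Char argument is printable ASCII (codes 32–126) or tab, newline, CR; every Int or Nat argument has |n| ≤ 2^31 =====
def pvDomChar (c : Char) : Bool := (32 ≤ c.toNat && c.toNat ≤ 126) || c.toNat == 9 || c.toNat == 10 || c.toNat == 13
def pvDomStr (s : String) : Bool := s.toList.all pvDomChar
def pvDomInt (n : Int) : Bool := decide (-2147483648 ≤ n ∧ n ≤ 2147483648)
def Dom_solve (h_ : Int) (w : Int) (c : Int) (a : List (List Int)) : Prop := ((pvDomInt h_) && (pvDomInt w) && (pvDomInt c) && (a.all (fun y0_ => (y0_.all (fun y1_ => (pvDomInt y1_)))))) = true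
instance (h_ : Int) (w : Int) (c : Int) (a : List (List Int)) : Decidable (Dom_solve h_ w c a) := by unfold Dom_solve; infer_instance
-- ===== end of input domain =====

-- B replaces A's two DP tables and three-branch scan by a direct brute-force minimum of
-- a[p] + a[q] + c*manhattan(p, q) over all ordered pairs of distinct cells (simpler, not faster).

-- ===== PORT A =====
-- a[i][j] for nonnegative indices (total form; Pre_solve excludes the IndexError inputs)
def cell (a : List (List Int)) (i j : ℕ) : Int :=
  PySem.List.pyGetD (PySem.List.pyGetD a (i : Int) []) (j : Int) 0

-- one assignment dp_left_up[i][j] = …, reading the table built so far and the current row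
def luEntry (c : Int) (a : List (List Int)) (tbl : List (List Int)) (row : List Int)
    (i j : ℕ) : Int :=
  let v := cell a i j
  let v1 := if 0 < i then min v ((tbl.getD (i - 1) []).getD j 0 + c) else v
  if 0 < j then min v1 (row.getD (j - 1) 0 + c) else v1

-- the dp_left_up table, filled row-major exactly as A's first double loop
def luTable (c : Int) (a : List (List Int)) (H W : ℕ) : List (List Int) :=
  (List.range H).foldl (fun tbl i =>
    tbl ++ [(List.range W).foldl (fun row j => row ++ [luEntry c a tbl row i j]) []]) []

-- one assignment dp_left_down[i][j] = …; 'below' holds the already-filled rows i+1 … h-1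
def ldEntry (h_ c : Int) (a : List (List Int)) (below : List (List Int)) (row : List Int)
    (i j : ℕ) : Int :=
  let v := cell a i j
  let v1 := if (i : Int) < h_ - 1 then min v ((below.headD []).getD j 0 + c) else v
  if 0 < j then min v1 (row.getD (j - 1) 0 + c) else v1

-- the dp_left_down table, filled for i = h-1 … 0 (rows are prepended, keeping row order)
def ldTable (h_ c : Int) (a : List (List Int)) (H W : ℕ) : List (List Int) :=
  (List.range H).reverse.foldl (fun tbl i =>
    ((List.range W).foldl (fun row j => row ++ [ldEntry h_ c a tbl row i j]) []) :: tbl) []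

-- res = (h + w - 2) * c + a[0][0] + a[-1][-1]  (shared by both ports: the same Python line)
def initRes (h_ w c : Int) (a : List (List Int)) : Int :=
  (h_ + w - 2) * c + PySem.List.pyGetD (PySem.List.pyGetD a 0 []) 0 0
    + PySem.List.pyGetD (PySem.List.pyGetD a (-1) []) (-1) 0

-- the body of A's final double loop: the three conditional updates, in A's order
def finStep (h_ c : Int) (a lu ld : List (List Int)) (res : Int) (i j : ℕ) : Int :=
  let r1 := if 0 < i then min (cell a i j + (lu.getD (i - 1) []).getD j 0 + c) res else res
  let r2 := if (i : Int) < h_ - 1 then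
      min (cell a i j + (ld.getD (i + 1) []).getD j 0 + c) r1 else r1
  if 0 < j then
    min (cell a i j + min ((lu.getD i []).getD (j - 1) 0) ((ld.getD i []).getD (j - 1) 0) + c) r2
  else r2

def solve (h_ : Int) (w : Int) (c : Int) (a : List (List Int)) : Int :=
  let lu := luTable c a h_.toNat w.toNat
  let ld := ldTable h_ c a h_.toNat w.toNat
  (List.range h_.toNat).foldl (fun res i =>
    (List.range w.toNat).foldl (fun res j => finStep h_ c a lu ld res i j) res)
    (initRes h_ w c a)

-- ===== PORT B =====
-- a[i1][j1] + a[i2][j2] + c * (abs(i1 - i2) + abs(j1 - j2))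
def cand (c : Int) (a : List (List Int)) (p q : ℕ × ℕ) : Int :=
  cell a p.1 p.2 + cell a q.1 q.2
    + c * (|(p.1 : Int) - (q.1 : Int)| + |(p.2 : Int) - (q.2 : Int)|)

-- the body of B's inner loop
def bStep (c : Int) (a : List (List Int)) (res : Int) (p q : ℕ × ℕ) : Int :=
  if p ≠ q then min res (cand c a p q) else res

def solve_alt (h_ : Int) (w : Int) (c : Int) (a : List (List Int)) : Int :=
  let cells := (List.range h_.toNat).flatMap (fun i => (List.range w.toNat).map (fun j => (i, j)))
  cells.foldl (fun res p => cells.foldl (fun res q => bStep c a res p q) res)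
    (initRes h_ w c a)

-- ===== PRECONDITION & SPEC =====
-- Pre_solve holds exactly when Python A returns: it raises IndexError iff a is empty, a[0] or
-- a[-1] is empty, or (when w > 0, so the inner loops run) h exceeds len(a) or some scanned row
-- is shorter than w.
def Pre_solve (h_ : Int) (w : Int) (c : Int) (a : List (List Int)) : Prop :=
  a ≠ [] ∧ a.headD [] ≠ [] ∧ a.getLastD [] ≠ [] ∧
    (w ≤ 0 ∨ (h_ ≤ (a.length : Int) ∧ ∀ i ∈ List.range h_.toNat, w ≤ ((a.getD i []).length : Int)))
instance (h_ : Int) (w : Int) (c : Int) (a : List (List Int)) : Decidable (Pre_solve h_ w c a) := by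
  unfold Pre_solve; infer_instance

def pvWitness_solve : Int × Int × Int × List (List Int) := (2, 2, 3, [[1, 2], [3, 4]])

def Spec_solve (h_ : Int) (w : Int) (c : Int) (a : List (List Int)) (out : Int) : Prop := out = solve_alt h_ w c a
instance (h_ : Int) (w : Int) (c : Int) (a : List (List Int)) (out : Int) : Decidable (Spec_solve h_ w c a out) := by unfold Spec_solve; infer_instance

-- ===== CLAIM (what is proved, stated in full; the proofs are below) =====
def Claim_equal_solve : Prop := ∀ (h_ : Int) (w : Int) (c : Int) (a : List (List Int)), Dom_solve h_ w c a → Pre_solve h_ w c a → Spec_solve h_ w c a (solve h_ w c a)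

-- ===== LEMMAS AND PROOFS =====

-- the mathematical value of dp_left_up[i][j], as a recursive function
def M (c : Int) (a : List (List Int)) (i j : ℕ) : Int :=
  let v := cell a i j
  let v1 := if h : 0 < i then min v (M c a (i - 1) j + c) else v
  if h : 0 < j then min v1 (M c a i (j - 1) + c) else v1
  termination_by (i, j)

-- the mathematical value of dp_left_down[i][j]
def N (h_ c : Int) (a : List (List Int)) (i j : ℕ) : Int :=
  let v := cell a i j
  let v1 := if h : (i : Int) < h_ - 1 then min v (N h_ c a (i + 1) j + c) else v
  if h : 0 < j then min v1 (N h_ c a i (j - 1) + c) else v1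
  termination_by ((h_ - 1).toNat - i, j)
  decreasing_by
  · apply Prod.Lex.left; omega
  · apply Prod.Lex.right; omega

lemma M_le_self (c : Int) (a : List (List Int)) (i j : ℕ) : M c a i j ≤ cell a i j := by
  rw [M]; split_ifs <;> simp [min_le_left] <;> exact Or.inl (min_le_left _ _)

lemma M_le_up (c : Int) (a : List (List Int)) (i j : ℕ) (h : 0 < i) :
    M c a i j ≤ M c a (i - 1) j + c := by
  rw [M]; rw [dif_pos h]; split_ifs <;>
    first
      | exact min_le_right _ _
      | exact le_trans (min_le_left _ _) (min_le_right _ _)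

lemma M_le_left (c : Int) (a : List (List Int)) (i j : ℕ) (h : 0 < j) :
    M c a i j ≤ M c a i (j - 1) + c := by
  rw [M]; rw [dif_pos h]; split_ifs <;> exact min_le_right _ _

lemma N_le_self (h_ c : Int) (a : List (List Int)) (i j : ℕ) : N h_ c a i j ≤ cell a i j := by
  rw [N]; split_ifs <;> simp [min_le_left] <;> exact Or.inl (min_le_left _ _)

lemma N_le_down (h_ c : Int) (a : List (List Int)) (i j : ℕ) (h : (i : Int) < h_ - 1) :
    N h_ c a i j ≤ N h_ c a (i + 1) j + c := by
  rw [N]; rw [dif_pos h]; split_ifs <;>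
    first
      | exact min_le_right _ _
      | exact le_trans (min_le_left _ _) (min_le_right _ _)

lemma N_le_left (h_ c : Int) (a : List (List Int)) (i j : ℕ) (h : 0 < j) :
    N h_ c a i j ≤ N h_ c a i (j - 1) + c := by
  rw [N]; rw [dif_pos h]; split_ifs <;> exact min_le_right _ _

lemma M_cases (c : Int) (a : List (List Int)) (i j : ℕ) :
    M c a i j = cell a i j ∨ (0 < i ∧ M c a i j = M c a (i - 1) j + c)
      ∨ (0 < j ∧ M c a i j = M c a i (j - 1) + c) := by
  rw [M]
  by_cases hi : 0 < i <;> by_cases hj : 0 < j <;> simp only [hi, hj, dif_pos, dif_neg,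
    not_false_iff, not_true]
  · rcases min_choice (min (cell a i j) (M c a (i - 1) j + c)) (M c a i (j - 1) + c) with h | h
    · rw [h]
      rcases min_choice (cell a i j) (M c a (i - 1) j + c) with h2 | h2
      · exact Or.inl h2
      · exact Or.inr (Or.inl ⟨trivial, h2⟩)
    · exact Or.inr (Or.inr ⟨trivial, h⟩)
  · rcases min_choice (cell a i j) (M c a (i - 1) j + c) with h | h
    · exact Or.inl h
    · exact Or.inr (Or.inl ⟨trivial, h⟩)
  · rcases min_choice (cell a i j) (M c a i (j - 1) + c) with h | h
    · exact Or.inl h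
    · exact Or.inr (Or.inr ⟨trivial, h⟩)
  · exact Or.inl trivial

lemma N_cases (h_ c : Int) (a : List (List Int)) (i j : ℕ) :
    N h_ c a i j = cell a i j ∨ ((i : Int) < h_ - 1 ∧ N h_ c a i j = N h_ c a (i + 1) j + c)
      ∨ (0 < j ∧ N h_ c a i j = N h_ c a i (j - 1) + c) := by
  rw [N]
  by_cases hi : (i : Int) < h_ - 1 <;> by_cases hj : 0 < j <;> simp only [hi, hj, dif_pos,
    dif_neg, not_false_iff, not_true]
  · rcases min_choice (min (cell a i j) (N h_ c a (i + 1) j + c)) (N h_ c a i (j - 1) + c)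
      with h | h
    · rw [h]
      rcases min_choice (cell a i j) (N h_ c a (i + 1) j + c) with h2 | h2
      · exact Or.inl h2
      · exact Or.inr (Or.inl ⟨trivial, h2⟩)
    · exact Or.inr (Or.inr ⟨trivial, h⟩)
  · rcases min_choice (cell a i j) (N h_ c a (i + 1) j + c) with h | h
    · exact Or.inl h
    · exact Or.inr (Or.inl ⟨trivial, h⟩)
  · rcases min_choice (cell a i j) (N h_ c a i (j - 1) + c) with h | h
    · exact Or.inl h
    · exact Or.inr (Or.inr ⟨trivial, h⟩)
  · exact Or.inl trivial

lemma M_le (c : Int) (a : List (List Int)) :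
    ∀ n i j i' j', i + j ≤ n → i' ≤ i → j' ≤ j →
      M c a i j ≤ cell a i' j' + c * (((i : ℤ) - i') + ((j : ℤ) - j')) := by
  intro n
  induction n with
  | zero =>
    intro i j i' j' hn hi hj
    have h1 : i = 0 ∧ j = 0 ∧ i' = 0 ∧ j' = 0 := by omega
    obtain ⟨rfl, rfl, rfl, rfl⟩ := h1
    simpa using M_le_self c a 0 0
  | succ n ih =>
    intro i j i' j' hn hi hj
    by_cases hii : i' < i
    · have h0 : 0 < i := by omega
      have hc : ((i - 1 : ℕ) : ℤ) = (i : ℤ) - 1 := by omega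
      have h2 := ih (i - 1) j i' j' (by omega) (by omega) hj
      have h3 := M_le_up c a i j h0
      rw [hc] at h2
      have : cell a i' j' + c * ((i : ℤ) - 1 - ↑i' + ((j : ℤ) - ↑j')) + c
          = cell a i' j' + c * (((i : ℤ) - i') + ((j : ℤ) - j')) := by ring
      linarith
    · have hie : i' = i := by omega
      subst hie
      by_cases hjj : j' < j
      · have h0 : 0 < j := by omega
        have hc : ((j - 1 : ℕ) : ℤ) = (j : ℤ) - 1 := by omega
        have h2 := ih i' (j - 1) i' j' (by omega) le_rfl (by omega)
        have h3 := M_le_left c a i' j h0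
        rw [hc] at h2
        have : cell a i' j' + c * ((i' : ℤ) - ↑i' + ((j : ℤ) - 1 - ↑j')) + c
            = cell a i' j' + c * (((i' : ℤ) - i') + ((j : ℤ) - j')) := by ring
        linarith
      · have hje : j' = j := by omega
        subst hje
        simpa using M_le_self c a i' j'

lemma N_le (h_ c : Int) (a : List (List Int)) :
    ∀ n i j i' j', ((h_ - 1).toNat - i) + j ≤ n → i ≤ i' → (i' : ℤ) ≤ h_ - 1 → j' ≤ j →
      N h_ c a i j ≤ cell a i' j' + c * (((i' : ℤ) - i) + ((j : ℤ) - j')) := by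
  intro n
  induction n with
  | zero =>
    intro i j i' j' hn hi hi' hj
    have hj0 : j = 0 := by omega
    have hii : i = i' := by omega
    subst hj0; subst hii
    have hje : j' = 0 := by omega
    subst hje
    simpa using N_le_self h_ c a i 0
  | succ n ih =>
    intro i j i' j' hn hi hi' hj
    by_cases hii : i < i'
    · have hg : (i : Int) < h_ - 1 := by
        have : (i : ℤ) < (i' : ℤ) := by exact_mod_cast hii
        omega
      have h3 := N_le_down h_ c a i j hg
      have h2 := ih (i + 1) j i' j' (by omega) (by omega) hi' hj
      have : cell a i' j' + c * ((i' : ℤ) - (↑i + 1) + ((j : ℤ) - ↑j')) + c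
          = cell a i' j' + c * (((i' : ℤ) - i) + ((j : ℤ) - j')) := by push_cast; ring
      have h2' : N h_ c a (i + 1) j
          ≤ cell a i' j' + c * ((i' : ℤ) - (↑i + 1) + ((j : ℤ) - ↑j')) := by
        simpa using h2
      linarith
    · have hie : i' = i := by omega
      subst hie
      by_cases hjj : j' < j
      · have h0 : 0 < j := by omega
        have hc : ((j - 1 : ℕ) : ℤ) = (j : ℤ) - 1 := by omega
        have h2 := ih i' (j - 1) i' j' (by omega) le_rfl hi' (by omega)
        have h3 := N_le_left h_ c a i' j h0
        rw [hc] at h2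
        have : cell a i' j' + c * ((i' : ℤ) - ↑i' + ((j : ℤ) - 1 - ↑j')) + c
            = cell a i' j' + c * (((i' : ℤ) - i') + ((j : ℤ) - j')) := by ring
        linarith
      · have hje : j' = j := by omega
        subst hje
        simpa using N_le_self h_ c a i' j'

lemma M_attained (c : Int) (a : List (List Int)) :
    ∀ n i j, i + j ≤ n → ∃ i' j', i' ≤ i ∧ j' ≤ j ∧
      M c a i j = cell a i' j' + c * (((i : ℤ) - i') + ((j : ℤ) - j')) := by
  intro n
  induction n with
  | zero =>
    intro i j hn
    have h1 : i = 0 ∧ j = 0 := by omega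
    obtain ⟨rfl, rfl⟩ := h1
    refine ⟨0, 0, le_rfl, le_rfl, ?_⟩
    rcases M_cases c a 0 0 with h | ⟨h0, _⟩ | ⟨h0, _⟩ <;> first | (simpa using h) | omega
  | succ n ih =>
    intro i j hn
    rcases M_cases c a i j with h | ⟨h0, h⟩ | ⟨h0, h⟩
    · exact ⟨i, j, le_rfl, le_rfl, by rw [h]; ring⟩
    · obtain ⟨i', j', hi', hj', he⟩ := ih (i - 1) j (by omega)
      refine ⟨i', j', by omega, hj', ?_⟩
      rw [h, he]
      have hc : ((i - 1 : ℕ) : ℤ) = (i : ℤ) - 1 := by omega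
      rw [hc]; ring
    · obtain ⟨i', j', hi', hj', he⟩ := ih i (j - 1) (by omega)
      refine ⟨i', j', hi', by omega, ?_⟩
      rw [h, he]
      have hc : ((j - 1 : ℕ) : ℤ) = (j : ℤ) - 1 := by omega
      rw [hc]; ring

lemma N_attained (h_ c : Int) (a : List (List Int)) :
    ∀ n i j, ((h_ - 1).toNat - i) + j ≤ n → (i : ℤ) ≤ h_ - 1 →
      ∃ i' j', i ≤ i' ∧ (i' : ℤ) ≤ h_ - 1 ∧ j' ≤ j ∧
        N h_ c a i j = cell a i' j' + c * (((i' : ℤ) - i) + ((j : ℤ) - j')) := by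
  intro n
  induction n with
  | zero =>
    intro i j hn hib
    have h1 : j = 0 := by omega
    subst h1
    refine ⟨i, 0, le_rfl, hib, le_rfl, ?_⟩
    rcases N_cases h_ c a i 0 with h | ⟨h0, _⟩ | ⟨h0, _⟩
    · simpa using h
    · omega
    · omega
  | succ n ih =>
    intro i j hn hib
    rcases N_cases h_ c a i j with h | ⟨h0, h⟩ | ⟨h0, h⟩
    · exact ⟨i, j, le_rfl, hib, le_rfl, by rw [h]; ring⟩
    · obtain ⟨i', j', hi', hib', hj', he⟩ := ih (i + 1) j (by omega) (by omega)
      refine ⟨i', j', by omega, hib', hj', ?_⟩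
      rw [h, he]; push_cast; ring
    · obtain ⟨i', j', hi', hib', hj', he⟩ := ih i (j - 1) (by omega) hib
      refine ⟨i', j', hi', hib', by omega, ?_⟩
      rw [h, he]
      have hc : ((j - 1 : ℕ) : ℤ) = (j : ℤ) - 1 := by omega
      rw [hc]; ring

-- table lemmas
lemma getD_map_range' (f : ℕ → Int) (n k : ℕ) (h : k < n) :
    ((List.range n).map f).getD k 0 = f k := by
  simp [List.getD, List.getElem?_map, List.getElem?_range, h]

lemma getD_map_range_list (f : ℕ → List Int) (n k : ℕ) (h : k < n) :
    ((List.range n).map f).getD k [] = f k := by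
  simp [List.getD, List.getElem?_map, List.getElem?_range, h]

lemma luEntry_eq (c : Int) (a : List (List Int)) (i j W : ℕ) (hj : j < W) :
    luEntry c a ((List.range i).map (fun r => (List.range W).map (fun s => M c a r s)))
      ((List.range j).map (fun s => M c a i s)) i j = M c a i j := by
  unfold luEntry
  rw [M]
  by_cases hi : 0 < i <;> by_cases h0 : 0 < j <;>
    simp only [hi, h0, if_pos, if_neg, dif_pos, dif_neg, not_false_iff, not_true, if_true,
      if_false]
  all_goals
    first
    | rfl
    | (rw [getD_map_range_list _ _ _ (by omega), getD_map_range' _ _ _ hj,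
        getD_map_range' _ _ _ (by omega)])
    | rw [getD_map_range_list _ _ _ (by omega), getD_map_range' _ _ _ hj]
    | rw [getD_map_range' _ _ _ (by omega)]

lemma luRow_eq (c : Int) (a : List (List Int)) (i W : ℕ) :
    ∀ W', W' ≤ W →
      (List.range W').foldl (fun row j => row ++
          [luEntry c a ((List.range i).map (fun r => (List.range W).map (fun s => M c a r s)))
            row i j]) []
        = (List.range W').map (fun j => M c a i j) := by
  intro W'
  induction W' with
  | zero => simp
  | succ W' ih =>
    intro hW
    rw [List.range_succ, List.foldl_append, List.map_append, ih (by omega)]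
    simp [luEntry_eq c a i W' W (by omega)]

lemma luTable_eq (c : Int) (a : List (List Int)) (W : ℕ) :
    ∀ H, luTable c a H W
      = (List.range H).map (fun i => (List.range W).map (fun j => M c a i j)) := by
  intro H
  induction H with
  | zero => simp [luTable]
  | succ H ih =>
    unfold luTable
    rw [List.range_succ, List.foldl_append]
    have hprev : (List.range H).foldl (fun tbl i =>
        tbl ++ [(List.range W).foldl (fun row j => row ++ [luEntry c a tbl row i j]) []]) []
        = luTable c a H W := rfl
    rw [hprev, ih, List.map_append, List.foldl_cons, List.foldl_nil]
    congr 1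
    simp [luRow_eq c a H W W le_rfl]

lemma ldEntry_eq (h_ c : Int) (a : List (List Int)) (i j W : ℕ) (hj : j < W)
    (below : List (List Int))
    (hb : (i : Int) < h_ - 1 →
      below.headD [] = (List.range W).map (fun s => N h_ c a (i + 1) s)) :
    ldEntry h_ c a below ((List.range j).map (fun s => N h_ c a i s)) i j = N h_ c a i j := by
  unfold ldEntry
  rw [N]
  by_cases hi : (i : Int) < h_ - 1 <;> by_cases h0 : 0 < j <;>
    simp only [hi, h0, if_pos, if_neg, dif_pos, dif_neg, not_false_iff, not_true, if_true,
      if_false]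
  all_goals
    first
    | rfl
    | (rw [hb hi, getD_map_range' _ _ _ hj, getD_map_range' _ _ _ (by omega)])
    | rw [hb hi, getD_map_range' _ _ _ hj]
    | rw [getD_map_range' _ _ _ (by omega)]

lemma ldRow_eq (h_ c : Int) (a : List (List Int)) (i W : ℕ) (below : List (List Int))
    (hb : (i : Int) < h_ - 1 →
      below.headD [] = (List.range W).map (fun s => N h_ c a (i + 1) s)) :
    ∀ W', W' ≤ W →
      (List.range W').foldl (fun row j => row ++ [ldEntry h_ c a below row i j]) []
        = (List.range W').map (fun j => N h_ c a i j) := by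
  intro W'
  induction W' with
  | zero => simp
  | succ W' ih =>
    intro hW
    rw [List.range_succ, List.foldl_append, List.map_append, ih (by omega)]
    simp [ldEntry_eq h_ c a i W' W (by omega) below hb]

lemma ldTable_aux (h_ c : Int) (a : List (List Int)) (W : ℕ) :
    ∀ n, n ≤ h_.toNat →
      (List.range n).reverse.foldl (fun tbl i =>
          ((List.range W).foldl (fun row j => row ++ [ldEntry h_ c a tbl row i j]) []) :: tbl)
        ((List.range' n (h_.toNat - n)).map
          (fun i => (List.range W).map (fun j => N h_ c a i j)))
        = (List.range h_.toNat).map (fun i => (List.range W).map (fun j => N h_ c a i j)) := by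
  intro n
  induction n with
  | zero =>
    intro _
    simp [List.range_eq_range']
  | succ n ih =>
    intro hn
    have hrev : (List.range (n + 1)).reverse = n :: (List.range n).reverse := by
      rw [List.range_succ, List.reverse_append]; rfl
    have hb : (n : Int) < h_ - 1 →
        ((List.range' (n + 1) (h_.toNat - (n + 1))).map
          (fun i => (List.range W).map (fun j => N h_ c a i j))).headD []
        = (List.range W).map (fun s => N h_ c a (n + 1) s) := by
      intro hg
      have h1 : h_.toNat - (n + 1) = (h_.toNat - (n + 1) - 1) + 1 := by omega
      rw [h1, List.range'_succ]
      simp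
    have hrow := ldRow_eq h_ c a n W _ hb W le_rfl
    have hr : (List.range' n (h_.toNat - n)).map
          (fun i => (List.range W).map (fun j => N h_ c a i j))
        = ((List.range W).map (fun j => N h_ c a n j))
            :: (List.range' (n + 1) (h_.toNat - (n + 1))).map
              (fun i => (List.range W).map (fun j => N h_ c a i j)) := by
      have h1 : h_.toNat - n = (h_.toNat - (n + 1)) + 1 := by omega
      rw [h1, List.range'_succ, List.map_cons]
    rw [hrev, List.foldl_cons]
    rw [hrow, ← hr]
    exact ih (by omega)

lemma ldTable_eq (h_ c : Int) (a : List (List Int)) (W : ℕ) :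
    ldTable h_ c a h_.toNat W
      = (List.range h_.toNat).map (fun i => (List.range W).map (fun j => N h_ c a i j)) := by
  have := ldTable_aux h_ c a W h_.toNat le_rfl
  simpa [ldTable] using this

lemma tbl_get (f : ℕ → ℕ → Int) (H W i j : ℕ) (hi : i < H) (hj : j < W) :
    (((List.range H).map (fun i => (List.range W).map (fun j => f i j))).getD i []).getD j 0
      = f i j := by
  simp [List.getD, List.getElem?_map, List.getElem?_range, hi, hj]

-- generic fold-min lemmas
lemma foldl_le_state {β : Type} (f : Int → β → Int) (hf : ∀ s x, f s x ≤ s) :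
    ∀ (l : List β) (s : Int), l.foldl f s ≤ s := by
  intro l
  induction l with
  | nil => intro s; simp
  | cons x t ih => intro s; exact le_trans (ih (f s x)) (hf s x)

lemma foldl_lb {β : Type} (f : Int → β → Int) (X : Int) :
    ∀ (l : List β) (s : Int), (∀ s x, x ∈ l → X ≤ s → X ≤ f s x) → X ≤ s → X ≤ l.foldl f s := by
  intro l
  induction l with
  | nil => intro s _ hs; simpa
  | cons x t ih =>
    intro s hstep hs
    exact ih (f s x) (fun s y hy => hstep s y (List.mem_cons_of_mem _ hy))
      (hstep s x (List.mem_cons_self) hs)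

lemma foldl_le_of_mem {β : Type} (f : Int → β → Int) (hf : ∀ s x, f s x ≤ s)
    (x : β) (B : Int) (hx : ∀ s, f s x ≤ B) :
    ∀ (l : List β) (s : Int), x ∈ l → l.foldl f s ≤ B := by
  intro l
  induction l with
  | nil => intro s h; simp at h
  | cons y t ih =>
    intro s hmem
    rcases List.mem_cons.mp hmem with rfl | hmem
    · exact le_trans (foldl_le_state f hf t (f s x)) (hx s)
    · exact ih (f s y) hmem

lemma mem_cells (Hn Wn : ℕ) (p : ℕ × ℕ) :
    p ∈ (List.range Hn).flatMap (fun i => (List.range Wn).map (fun j => (i, j)))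
      ↔ p.1 < Hn ∧ p.2 < Wn := by
  cases p with
  | mk x y => simp [List.mem_flatMap, List.mem_range, eq_comm, Prod.ext_iff, and_assoc]

-- abbreviations for the fully-computed tables
def LUt (c : Int) (a : List (List Int)) (H W : ℕ) : List (List Int) :=
  (List.range H).map (fun i => (List.range W).map (fun j => M c a i j))

def LDt (h_ c : Int) (a : List (List Int)) (W : ℕ) : List (List Int) :=
  (List.range h_.toNat).map (fun i => (List.range W).map (fun j => N h_ c a i j))

def Afold (h_ w c : Int) (a : List (List Int)) : Int :=
  (List.range h_.toNat).foldl (fun res i =>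
    (List.range w.toNat).foldl
      (fun res j => finStep h_ c a (LUt c a h_.toNat w.toNat) (LDt h_ c a w.toNat) res i j) res)
    (initRes h_ w c a)

lemma solve_eq_Afold (h_ w c : Int) (a : List (List Int)) :
    solve h_ w c a = Afold h_ w c a := by
  unfold solve Afold LUt LDt
  rw [luTable_eq, ldTable_eq]

-- conditional-min step lemmas
lemma ite_min_le_v (cond : Prop) [Decidable cond] (v s : Int) (hc : cond) :
    (if cond then min v s else s) ≤ v := by
  rw [if_pos hc]; exact min_le_left _ _

lemma ite_min_le_s (cond : Prop) [Decidable cond] (v s : Int) :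
    (if cond then min v s else s) ≤ s := by
  split_ifs
  · exact min_le_right _ _
  · exact le_refl _

lemma ge_ite_min (cond : Prop) [Decidable cond] (X v s : Int) (h : cond → X ≤ v) (hs : X ≤ s) :
    X ≤ if cond then min v s else s := by
  split_ifs with hc
  · exact le_min (h hc) hs
  · exact hs

lemma finStep_le (h_ c : Int) (a lu ld : List (List Int)) (res : Int) (i j : ℕ) :
    finStep h_ c a lu ld res i j ≤ res := by
  unfold finStep
  exact le_trans (ite_min_le_s _ _ _)
    (le_trans (ite_min_le_s _ _ _) (ite_min_le_s _ _ _))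

lemma finStep_ge (h_ c : Int) (a lu ld : List (List Int)) (X s : Int) (i j : ℕ) (hs : X ≤ s)
    (h1 : 0 < i → X ≤ cell a i j + (lu.getD (i - 1) []).getD j 0 + c)
    (h2 : (i : Int) < h_ - 1 → X ≤ cell a i j + (ld.getD (i + 1) []).getD j 0 + c)
    (h3 : 0 < j → X ≤ cell a i j
      + min ((lu.getD i []).getD (j - 1) 0) ((ld.getD i []).getD (j - 1) 0) + c) :
    X ≤ finStep h_ c a lu ld s i j := by
  unfold finStep
  exact ge_ite_min _ _ _ _ h3 (ge_ite_min _ _ _ _ h2 (ge_ite_min _ _ _ _ h1 hs))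

lemma bStep_le (c : Int) (a : List (List Int)) (res : Int) (p q : ℕ × ℕ) :
    bStep c a res p q ≤ res := by
  unfold bStep
  split_ifs
  · exact min_le_left _ _
  · exact le_refl _

lemma Afold_le_init (h_ w c : Int) (a : List (List Int)) :
    Afold h_ w c a ≤ initRes h_ w c a := by
  unfold Afold
  exact foldl_le_state _ (fun s i => foldl_le_state _ (fun s' j => finStep_le _ _ _ _ _ _ _ _) _ s) _ _

lemma Afold_le_b1 (h_ w c : Int) (a : List (List Int)) (i j : ℕ)
    (hi : i < h_.toNat) (hj : j < w.toNat) (h0 : 0 < i) :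
    Afold h_ w c a ≤ cell a i j + M c a (i - 1) j + c := by
  unfold Afold
  refine foldl_le_of_mem _
    (fun s x => foldl_le_state _ (fun s' j' => finStep_le _ _ _ _ _ _ _ _) _ s) i _
    (fun s => ?_) _ _ (List.mem_range.mpr hi)
  refine foldl_le_of_mem _ (fun s' j' => finStep_le _ _ _ _ _ _ _ _) j _ (fun s' => ?_) _ _
    (List.mem_range.mpr hj)
  unfold finStep
  have hlu : ((LUt c a h_.toNat w.toNat).getD (i - 1) []).getD j 0 = M c a (i - 1) j := by
    unfold LUt; exact tbl_get _ _ _ _ _ (by omega) hj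
  rw [hlu]
  exact le_trans (ite_min_le_s _ _ _)
    (le_trans (ite_min_le_s _ _ _) (ite_min_le_v _ _ _ h0))

lemma Afold_le_b2 (h_ w c : Int) (a : List (List Int)) (i j : ℕ)
    (hi : i < h_.toNat) (hj : j < w.toNat) (hg : (i : Int) < h_ - 1) :
    Afold h_ w c a ≤ cell a i j + N h_ c a (i + 1) j + c := by
  unfold Afold
  refine foldl_le_of_mem _
    (fun s x => foldl_le_state _ (fun s' j' => finStep_le _ _ _ _ _ _ _ _) _ s) i _
    (fun s => ?_) _ _ (List.mem_range.mpr hi)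
  refine foldl_le_of_mem _ (fun s' j' => finStep_le _ _ _ _ _ _ _ _) j _ (fun s' => ?_) _ _
    (List.mem_range.mpr hj)
  unfold finStep
  have hld : ((LDt h_ c a w.toNat).getD (i + 1) []).getD j 0 = N h_ c a (i + 1) j := by
    unfold LDt; exact tbl_get _ _ _ _ _ (by omega) hj
  rw [hld]
  exact le_trans (ite_min_le_s _ _ _) (ite_min_le_v _ _ _ hg)

lemma Afold_le_b3 (h_ w c : Int) (a : List (List Int)) (i j : ℕ)
    (hi : i < h_.toNat) (hj : j < w.toNat) (h0 : 0 < j) :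
    Afold h_ w c a ≤ cell a i j + min (M c a i (j - 1)) (N h_ c a i (j - 1)) + c := by
  unfold Afold
  refine foldl_le_of_mem _
    (fun s x => foldl_le_state _ (fun s' j' => finStep_le _ _ _ _ _ _ _ _) _ s) i _
    (fun s => ?_) _ _ (List.mem_range.mpr hi)
  refine foldl_le_of_mem _ (fun s' j' => finStep_le _ _ _ _ _ _ _ _) j _ (fun s' => ?_) _ _
    (List.mem_range.mpr hj)
  unfold finStep
  have hlu : ((LUt c a h_.toNat w.toNat).getD i []).getD (j - 1) 0 = M c a i (j - 1) := by
    unfold LUt; exact tbl_get _ _ _ _ _ hi (by omega)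
  have hld : ((LDt h_ c a w.toNat).getD i []).getD (j - 1) 0 = N h_ c a i (j - 1) := by
    unfold LDt; exact tbl_get _ _ _ _ _ hi (by omega)
  rw [hlu, hld]
  exact ite_min_le_v _ _ _ h0

lemma Afold_ge (h_ w c : Int) (a : List (List Int)) (X : Int)
    (hinit : X ≤ initRes h_ w c a)
    (hb1 : ∀ i j, i < h_.toNat → j < w.toNat → 0 < i →
      X ≤ cell a i j + M c a (i - 1) j + c)
    (hb2 : ∀ i j, i < h_.toNat → j < w.toNat → (i : Int) < h_ - 1 →
      X ≤ cell a i j + N h_ c a (i + 1) j + c)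
    (hb3 : ∀ i j, i < h_.toNat → j < w.toNat → 0 < j →
      X ≤ cell a i j + min (M c a i (j - 1)) (N h_ c a i (j - 1)) + c) :
    X ≤ Afold h_ w c a := by
  unfold Afold
  refine foldl_lb _ _ _ _ (fun s i hi hXs => ?_) hinit
  refine foldl_lb _ _ _ _ (fun s' j hj hX's => ?_) hXs
  have hi' := List.mem_range.mp hi
  have hj' := List.mem_range.mp hj
  refine finStep_ge _ _ _ _ _ _ _ _ _ hX's (fun h0 => ?_) (fun hg => ?_) (fun h0 => ?_)
  · have hlu : ((LUt c a h_.toNat w.toNat).getD (i - 1) []).getD j 0 = M c a (i - 1) j := by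
      unfold LUt; exact tbl_get _ _ _ _ _ (by omega) hj'
    rw [hlu]; exact hb1 i j hi' hj' h0
  · have hld : ((LDt h_ c a w.toNat).getD (i + 1) []).getD j 0 = N h_ c a (i + 1) j := by
      unfold LDt; exact tbl_get _ _ _ _ _ (by omega) hj'
    rw [hld]; exact hb2 i j hi' hj' hg
  · have hlu : ((LUt c a h_.toNat w.toNat).getD i []).getD (j - 1) 0 = M c a i (j - 1) := by
      unfold LUt; exact tbl_get _ _ _ _ _ hi' (by omega)
    have hld : ((LDt h_ c a w.toNat).getD i []).getD (j - 1) 0 = N h_ c a i (j - 1) := by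
      unfold LDt; exact tbl_get _ _ _ _ _ hi' (by omega)
    rw [hlu, hld]; exact hb3 i j hi' hj' h0

lemma B_le_init (h_ w c : Int) (a : List (List Int)) :
    solve_alt h_ w c a ≤ initRes h_ w c a := by
  unfold solve_alt
  exact foldl_le_state _ (fun s p => foldl_le_state _ (fun s' q => bStep_le _ _ _ _ _) _ s) _ _

lemma B_le_cand (h_ w c : Int) (a : List (List Int)) (p q : ℕ × ℕ)
    (hp1 : p.1 < h_.toNat) (hp2 : p.2 < w.toNat)
    (hq1 : q.1 < h_.toNat) (hq2 : q.2 < w.toNat) (hne : p ≠ q) :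
    solve_alt h_ w c a ≤ cand c a p q := by
  unfold solve_alt
  refine foldl_le_of_mem _
    (fun s x => foldl_le_state _ (fun s' y => bStep_le _ _ _ _ _) _ s) p _
    (fun s => ?_) _ _ ((mem_cells _ _ _).mpr ⟨hp1, hp2⟩)
  refine foldl_le_of_mem _ (fun s' y => bStep_le _ _ _ _ _) q _ (fun s' => ?_) _ _
    ((mem_cells _ _ _).mpr ⟨hq1, hq2⟩)
  unfold bStep
  rw [if_pos hne]
  exact min_le_right _ _

lemma B_ge (h_ w c : Int) (a : List (List Int)) (X : Int)
    (hinit : X ≤ initRes h_ w c a)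
    (hc : ∀ p q : ℕ × ℕ, p.1 < h_.toNat → p.2 < w.toNat → q.1 < h_.toNat → q.2 < w.toNat →
      p ≠ q → X ≤ cand c a p q) :
    X ≤ solve_alt h_ w c a := by
  unfold solve_alt
  refine foldl_lb _ _ _ _ (fun s p hp hXs => ?_) hinit
  refine foldl_lb _ _ _ _ (fun s' q hq hX's => ?_) hXs
  obtain ⟨hp1, hp2⟩ := (mem_cells _ _ _).mp hp
  obtain ⟨hq1, hq2⟩ := (mem_cells _ _ _).mp hq
  unfold bStep
  split_ifs with hne
  · exact le_min hX's (hc p q hp1 hp2 hq1 hq2 hne)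
  · exact hX's

lemma A_le_B (h_ w c : Int) (a : List (List Int)) :
    Afold h_ w c a ≤ solve_alt h_ w c a := by
  refine B_ge h_ w c a _ (Afold_le_init h_ w c a) (fun p q hp1 hp2 hq1 hq2 hne => ?_)
  obtain ⟨i1, j1⟩ := p
  obtain ⟨i2, j2⟩ := q
  simp only at hp1 hp2 hq1 hq2
  unfold cand
  simp only
  rcases lt_trichotomy j2 j1 with hj | hj | hj
  · -- partner strictly to the left: branch 3 at (i1, j1)
    have h := Afold_le_b3 h_ w c a i1 j1 hp1 hp2 (by omega)
    have hcast : ((j1 - 1 : ℕ) : ℤ) = (j1 : ℤ) - 1 := by omega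
    have habsj : |(j1 : ℤ) - (j2 : ℤ)| = (j1 : ℤ) - j2 := abs_of_nonneg (by omega)
    by_cases hii : i2 ≤ i1
    · have hm := M_le c a (i1 + (j1 - 1)) i1 (j1 - 1) i2 j2 le_rfl hii (by omega)
      rw [hcast] at hm
      have habsi : |(i1 : ℤ) - (i2 : ℤ)| = (i1 : ℤ) - i2 := abs_of_nonneg (by omega)
      rw [habsi, habsj]
      have hmin := min_le_left (M c a i1 (j1 - 1)) (N h_ c a i1 (j1 - 1))
      have hring : c * ((i1 : ℤ) - i2 + ((j1 : ℤ) - j2))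
          = c * ((i1 : ℤ) - i2 + ((j1 : ℤ) - 1 - j2)) + c := by ring
      linarith
    · have hn := N_le h_ c a (((h_ - 1).toNat - i1) + (j1 - 1)) i1 (j1 - 1) i2 j2 le_rfl
        (by omega) (by omega) (by omega)
      rw [hcast] at hn
      have habsi : |(i1 : ℤ) - (i2 : ℤ)| = (i2 : ℤ) - i1 := by
        rw [abs_sub_comm]
        exact abs_of_nonneg (by omega)
      rw [habsi, habsj]
      have hmin := min_le_right (M c a i1 (j1 - 1)) (N h_ c a i1 (j1 - 1))
      have hring : c * ((i2 : ℤ) - i1 + ((j1 : ℤ) - j2))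
          = c * ((i2 : ℤ) - i1 + ((j1 : ℤ) - 1 - j2)) + c := by ring
      linarith
  · -- same column: branch 1 or branch 2 at (i1, j1)
    have hjz : (j1 : ℤ) = (j2 : ℤ) := by omega
    have habsj : |(j1 : ℤ) - (j2 : ℤ)| = 0 := by rw [hjz, sub_self, abs_zero]
    rcases lt_trichotomy i2 i1 with hii | hii | hii
    · have h := Afold_le_b1 h_ w c a i1 j1 hp1 hp2 (by omega)
      have hm := M_le c a ((i1 - 1) + j1) (i1 - 1) j1 i2 j2 le_rfl (by omega) (by omega)
      have hcast : ((i1 - 1 : ℕ) : ℤ) = (i1 : ℤ) - 1 := by omega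
      rw [hcast] at hm
      have habsi : |(i1 : ℤ) - (i2 : ℤ)| = (i1 : ℤ) - i2 := abs_of_nonneg (by omega)
      rw [habsi, habsj]
      have hring : c * ((i1 : ℤ) - i2 + 0)
          = c * ((i1 : ℤ) - 1 - i2 + ((j1 : ℤ) - j2)) + c := by rw [hjz]; ring
      linarith
    · exact absurd (Prod.ext_iff.mpr ⟨by omega, by omega⟩) hne
    · have hg : (i1 : Int) < h_ - 1 := by omega
      have h := Afold_le_b2 h_ w c a i1 j1 hp1 hp2 hg
      have hn := N_le h_ c a (((h_ - 1).toNat - (i1 + 1)) + j1) (i1 + 1) j1 i2 j2 le_rfl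
        (by omega) (by omega) (by omega)
      have hcast : ((i1 + 1 : ℕ) : ℤ) = (i1 : ℤ) + 1 := by omega
      rw [hcast] at hn
      have habsi : |(i1 : ℤ) - (i2 : ℤ)| = (i2 : ℤ) - i1 := by
        rw [abs_sub_comm]
        exact abs_of_nonneg (by omega)
      rw [habsi, habsj]
      have hring : c * ((i2 : ℤ) - i1 + 0)
          = c * ((i2 : ℤ) - ((i1 : ℤ) + 1) + ((j1 : ℤ) - j2)) + c := by rw [hjz]; ring
      linarith
  · -- partner strictly to the right: branch 3 at (i2, j2)
    have h := Afold_le_b3 h_ w c a i2 j2 hq1 hq2 (by omega)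
    have hcast : ((j2 - 1 : ℕ) : ℤ) = (j2 : ℤ) - 1 := by omega
    have habsj : |(j1 : ℤ) - (j2 : ℤ)| = (j2 : ℤ) - j1 := by
      rw [abs_sub_comm]
      exact abs_of_nonneg (by omega)
    by_cases hii : i1 ≤ i2
    · have hm := M_le c a (i2 + (j2 - 1)) i2 (j2 - 1) i1 j1 le_rfl hii (by omega)
      rw [hcast] at hm
      have habsi : |(i1 : ℤ) - (i2 : ℤ)| = (i2 : ℤ) - i1 := by
        rw [abs_sub_comm]
        exact abs_of_nonneg (by omega)
      rw [habsi, habsj]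
      have hmin := min_le_left (M c a i2 (j2 - 1)) (N h_ c a i2 (j2 - 1))
      have hring : c * ((i2 : ℤ) - i1 + ((j2 : ℤ) - j1))
          = c * ((i2 : ℤ) - i1 + ((j2 : ℤ) - 1 - j1)) + c := by ring
      linarith
    · have hn := N_le h_ c a (((h_ - 1).toNat - i2) + (j2 - 1)) i2 (j2 - 1) i1 j1 le_rfl
        (by omega) (by omega) (by omega)
      rw [hcast] at hn
      have habsi : |(i1 : ℤ) - (i2 : ℤ)| = (i1 : ℤ) - i2 := abs_of_nonneg (by omega)
      rw [habsi, habsj]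
      have hmin := min_le_right (M c a i2 (j2 - 1)) (N h_ c a i2 (j2 - 1))
      have hring : c * ((i1 : ℤ) - i2 + ((j2 : ℤ) - j1))
          = c * ((i1 : ℤ) - i2 + ((j2 : ℤ) - 1 - j1)) + c := by ring
      linarith

lemma B_le_A (h_ w c : Int) (a : List (List Int)) :
    solve_alt h_ w c a ≤ Afold h_ w c a := by
  refine Afold_ge h_ w c a _ (B_le_init h_ w c a) (fun i j hi hj h0 => ?_)
    (fun i j hi hj hg => ?_) (fun i j hi hj h0 => ?_)
  · obtain ⟨i', j', hi', hj', he⟩ := M_attained c a ((i - 1) + j) (i - 1) j le_rfl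
    rw [he]
    have hcand : cand c a (i, j) (i', j')
        = cell a i j + (cell a i' j' + c * (((i - 1 : ℕ) : ℤ) - i' + ((j : ℤ) - j'))) + c := by
      unfold cand
      simp only
      have habsi : |(i : ℤ) - (i' : ℤ)| = (i : ℤ) - i' := abs_of_nonneg (by omega)
      have habsj : |(j : ℤ) - (j' : ℤ)| = (j : ℤ) - j' := abs_of_nonneg (by
        have : (j' : ℤ) ≤ (j : ℤ) := by exact_mod_cast hj'
        omega)
      have hcast : ((i - 1 : ℕ) : ℤ) = (i : ℤ) - 1 := by omega
      have hii : (i' : ℤ) ≤ (i : ℤ) - 1 := by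
        have : (i' : ℤ) ≤ ((i - 1 : ℕ) : ℤ) := by exact_mod_cast hi'
        omega
      rw [habsi, habsj, hcast]
      ring
    rw [← hcand]
    exact B_le_cand h_ w c a _ _ hi hj (by simp only; omega) (by simp only; omega)
      (by simp only [ne_eq, Prod.mk.injEq, not_and]; intro h1 _; omega)
  · obtain ⟨i', j', hi', hib', hj', he⟩ := N_attained h_ c a
      (((h_ - 1).toNat - (i + 1)) + j) (i + 1) j le_rfl (by omega)
    rw [he]
    have hcand : cand c a (i, j) (i', j')
        = cell a i j + (cell a i' j' + c * ((i' : ℤ) - ((i + 1 : ℕ) : ℤ) + ((j : ℤ) - j'))) + c := by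
      unfold cand
      simp only
      have hii : ((i : ℤ) + 1) ≤ (i' : ℤ) := by
        have : ((i + 1 : ℕ) : ℤ) ≤ (i' : ℤ) := by exact_mod_cast hi'
        omega
      have habsi : |(i : ℤ) - (i' : ℤ)| = (i' : ℤ) - i := by
        rw [abs_sub_comm]
        exact abs_of_nonneg (by omega)
      have habsj : |(j : ℤ) - (j' : ℤ)| = (j : ℤ) - j' := abs_of_nonneg (by
        have : (j' : ℤ) ≤ (j : ℤ) := by exact_mod_cast hj'
        omega)
      have hcast : ((i + 1 : ℕ) : ℤ) = (i : ℤ) + 1 := by omega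
      rw [habsi, habsj, hcast]
      ring
    rw [← hcand]
    exact B_le_cand h_ w c a _ _ hi hj (by simp only; omega) (by simp only; omega)
      (by simp only [ne_eq, Prod.mk.injEq, not_and]
          intro h1 _
          have : ((i : ℤ) + 1) ≤ (i' : ℤ) := by
            have : ((i + 1 : ℕ) : ℤ) ≤ (i' : ℤ) := by exact_mod_cast hi'
            omega
          omega)
  · rcases min_choice (M c a i (j - 1)) (N h_ c a i (j - 1)) with hmin | hmin
    · rw [hmin]
      obtain ⟨i', j', hi', hj', he⟩ := M_attained c a (i + (j - 1)) i (j - 1) le_rfl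
      rw [he]
      have hcand : cand c a (i, j) (i', j')
          = cell a i j + (cell a i' j' + c * ((i : ℤ) - i' + (((j - 1 : ℕ) : ℤ) - j'))) + c := by
        unfold cand
        simp only
        have habsi : |(i : ℤ) - (i' : ℤ)| = (i : ℤ) - i' := abs_of_nonneg (by
          have : (i' : ℤ) ≤ (i : ℤ) := by exact_mod_cast hi'
          omega)
        have hjj : (j' : ℤ) ≤ (j : ℤ) - 1 := by
          have : (j' : ℤ) ≤ ((j - 1 : ℕ) : ℤ) := by exact_mod_cast hj'
          omega
        have habsj : |(j : ℤ) - (j' : ℤ)| = (j : ℤ) - j' := abs_of_nonneg (by omega)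
        have hcast : ((j - 1 : ℕ) : ℤ) = (j : ℤ) - 1 := by omega
        rw [habsi, habsj, hcast]
        ring
      rw [← hcand]
      exact B_le_cand h_ w c a _ _ hi hj (by simp only; omega) (by simp only; omega)
        (by simp only [ne_eq, Prod.mk.injEq, not_and]; intro _ h2; omega)
    · rw [hmin]
      obtain ⟨i', j', hi', hib', hj', he⟩ := N_attained h_ c a
        (((h_ - 1).toNat - i) + (j - 1)) i (j - 1) le_rfl (by omega)
      rw [he]
      have hcand : cand c a (i, j) (i', j')
          = cell a i j + (cell a i' j' + c * ((i' : ℤ) - i + (((j - 1 : ℕ) : ℤ) - j'))) + c := by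
        unfold cand
        simp only
        have habsi : |(i : ℤ) - (i' : ℤ)| = (i' : ℤ) - i := by
          rw [abs_sub_comm]
          exact abs_of_nonneg (by
            have : (i : ℤ) ≤ (i' : ℤ) := by exact_mod_cast hi'
            omega)
        have hjj : (j' : ℤ) ≤ (j : ℤ) - 1 := by
          have : (j' : ℤ) ≤ ((j - 1 : ℕ) : ℤ) := by exact_mod_cast hj'
          omega
        have habsj : |(j : ℤ) - (j' : ℤ)| = (j : ℤ) - j' := abs_of_nonneg (by omega)
        have hcast : ((j - 1 : ℕ) : ℤ) = (j : ℤ) - 1 := by omega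
        rw [habsi, habsj, hcast]
        ring
      rw [← hcand]
      exact B_le_cand h_ w c a _ _ hi hj (by simp only; omega) (by simp only; omega)
        (by simp only [ne_eq, Prod.mk.injEq, not_and]; intro _ h2; omega)

lemma main_eq (h_ w c : Int) (a : List (List Int)) : solve h_ w c a = solve_alt h_ w c a := by
  rw [solve_eq_Afold]
  exact le_antisymm (A_le_B h_ w c a) (B_le_A h_ w c a)

-- ===== VERDICT (by name: the statement is the Claim_ definition above) =====
theorem solve_spec : Claim_equal_solve := by
  intro h_ w c a _ _
  unfold Spec_solve
  exact main_eq h_ w c a
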